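-- pv_equiv track=rewrite | github.com/gh123man/advent-of-code | 2023/12/12.py | isValidBkw
-- ===== SOURCE A (Python) =====
-- def isValidBkw(problem, size):
--     l = 0
--     for c in problem[::-1]:
--         if c == "#":
--             l += 1
--         elif l > 0:
--             break
--     return l == size
-- ===== SOURCE B (Python) =====
-- def isValidBkw(problem, size):
--     # Forward single pass: collect the lengths of all maximal runs of '#',
--     # then compare the last run's length (0 if there is none) with size.
--     runs = []
--     cur = 0
--     for c in problem:
--         if c == "#":
--             cur += 1
--         elif cur > 0:
--             runs.append(cur)
--             cur = 0
--     if cur > 0: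
--         runs.append(cur)
--     return (runs[-1] if runs else 0) == size
-- ===== Notes on version B (the rewrite author's own statement) =====
-- stated objective: alternative
-- what changed: B scans the string forward once, collecting the lengths of all maximal '#' runs into a list, and compares the last run length (0 if none) with size, instead of A's backward scan over the reversed string with an early break after the last run.
import Mathlib
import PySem

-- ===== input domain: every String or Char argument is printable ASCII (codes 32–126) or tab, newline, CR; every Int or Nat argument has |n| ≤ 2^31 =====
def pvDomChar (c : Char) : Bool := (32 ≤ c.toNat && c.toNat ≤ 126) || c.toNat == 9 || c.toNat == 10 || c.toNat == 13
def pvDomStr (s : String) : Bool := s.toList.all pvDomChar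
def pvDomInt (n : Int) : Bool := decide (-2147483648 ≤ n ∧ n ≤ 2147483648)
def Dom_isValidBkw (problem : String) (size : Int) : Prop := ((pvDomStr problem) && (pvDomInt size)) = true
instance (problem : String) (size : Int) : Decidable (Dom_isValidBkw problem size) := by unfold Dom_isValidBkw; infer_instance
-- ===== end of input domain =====

-- B replaces A's backward scan (with early break) by one forward pass that collects all
-- maximal '#'-run lengths and compares the last one with size: an alternative algorithm.

-- ===== PORT A =====
-- the loop 'for c in problem[::-1]: …' with its break, over accumulator l
def isValidBkwGo : List Char → Int → Int
  | [], l => l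
  | c :: rest, l =>
      if c = '#' then isValidBkwGo rest (l + 1)
      else if l > 0 then l                 -- break: return current l
      else isValidBkwGo rest l

-- problem[::-1] is the reversed character list (exact for a full step -1 slice)
def isValidBkw (problem : String) (size : Int) : Bool :=
  isValidBkwGo problem.toList.reverse 0 == size

-- ===== PORT B =====
-- forward loop of Source B: runs accumulated in order, cur = length of the current run
def isValidBkwAltGo : List Char → Int → List Int → List Int
  | [], cur, runs => if cur > 0 then runs ++ [cur] else runs
  | c :: rest, cur, runs =>
      if c = '#' then isValidBkwAltGo rest (cur + 1) runs
      else if cur > 0 then isValidBkwAltGo rest 0 (runs ++ [cur])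
      else isValidBkwAltGo rest cur runs

-- (runs[-1] if runs else 0) == size
def isValidBkw_alt (problem : String) (size : Int) : Bool :=
  ((isValidBkwAltGo problem.toList 0 []).getLast?.getD 0) == size

-- ===== PRECONDITION & SPEC =====
def Spec_isValidBkw (problem : String) (size : Int) (out : Bool) : Prop := out = isValidBkw_alt problem size
instance (problem : String) (size : Int) (out : Bool) : Decidable (Spec_isValidBkw problem size out) := by unfold Spec_isValidBkw; infer_instance

-- ===== CLAIM (what is proved, stated in full; the proofs are below) =====
def Claim_equal_isValidBkw : Prop := ∀ (problem : String) (size : Int), Dom_isValidBkw problem size → Spec_isValidBkw problem size (isValidBkw problem size)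

-- ===== LEMMAS AND PROOFS =====

-- length of the first maximal '#'-run of a list (0 if none)
def pvFirstRun (xs : List Char) : Int :=
  ((xs.dropWhile (· ≠ '#')).takeWhile (· = '#')).length

theorem go_pos (cs : List Char) : ∀ l : Int, 0 < l →
    isValidBkwGo cs l = l + (cs.takeWhile (· = '#')).length := by
  induction cs with
  | nil => intro l _; simp [isValidBkwGo]
  | cons c rest ih =>
    intro l hl
    by_cases hc : c = '#'
    · simp only [isValidBkwGo, if_pos hc, ih (l + 1) (by omega), List.takeWhile_cons, hc]
      simp
      push_cast; ring
    · simp [isValidBkwGo, hc, hl, List.takeWhile_cons]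

theorem go_zero (cs : List Char) : isValidBkwGo cs 0 = pvFirstRun cs := by
  induction cs with
  | nil => simp [isValidBkwGo, pvFirstRun]
  | cons c rest ih =>
    by_cases hc : c = '#'
    · simp only [isValidBkwGo, if_pos hc, pvFirstRun, List.dropWhile_cons, hc]
      simp [go_pos rest 1 (by omega), List.takeWhile_cons]
      push_cast; ring
    · simpa [isValidBkwGo, hc, pvFirstRun, List.dropWhile_cons] using ih

theorem altGo_acc (cs : List Char) : ∀ (cur : Int) (runs : List Int),
    isValidBkwAltGo cs cur runs = runs ++ isValidBkwAltGo cs cur [] := by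
  induction cs with
  | nil => intro cur runs; by_cases h : cur > 0 <;> simp [isValidBkwAltGo, h]
  | cons c rest ih =>
    intro cur runs
    by_cases hc : c = '#'
    · simp only [isValidBkwAltGo, if_pos hc]; exact ih (cur + 1) runs
    · by_cases h : cur > 0
      · simp only [isValidBkwAltGo, if_neg hc, if_pos h]
        rw [ih 0 (runs ++ [cur]), ih 0 ([] ++ [cur])]
        simp
      · simp only [isValidBkwAltGo, if_neg hc, if_neg h]; exact ih cur runs

theorem altGo_pos_ne_nil (cs : List Char) : ∀ cur : Int, 0 < cur →
    isValidBkwAltGo cs cur [] ≠ [] := by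
  induction cs with
  | nil => intro cur h; simp [isValidBkwAltGo, h]
  | cons c rest ih =>
    intro cur h
    by_cases hc : c = '#'
    · simpa [isValidBkwAltGo, hc] using ih (cur + 1) (by omega)
    · simp only [isValidBkwAltGo, if_neg hc, if_pos h]
      rw [altGo_acc]
      simp

theorem altGo_nil_iff (cs : List Char) :
    isValidBkwAltGo cs 0 [] = [] ↔ '#' ∉ cs := by
  induction cs with
  | nil => simp [isValidBkwAltGo]
  | cons c rest ih =>
    by_cases hc : c = '#'
    · simp only [isValidBkwAltGo, if_pos hc]
      constructor
      · intro h; exact absurd h (altGo_pos_ne_nil rest 1 (by omega))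
      · intro h; exact absurd (by simp [hc]) h
    · simp only [isValidBkwAltGo, if_neg hc]
      simp only [if_neg (by omega : ¬ (0:Int) > 0)]
      rw [ih]
      simp [hc, Ne.symm hc]

theorem firstRun_no_hash (xs : List Char) (h : '#' ∉ xs) : pvFirstRun xs = 0 := by
  induction xs with
  | nil => simp [pvFirstRun]
  | cons c rest ih =>
    have hc : c ≠ '#' := by intro e; exact h (by simp [e])
    have := ih (by intro m; exact h (by simp [m]))
    simpa [pvFirstRun, List.dropWhile_cons, hc] using this

theorem firstRun_replicate (n : Nat) : pvFirstRun (List.replicate n '#') = n := by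
  cases n with
  | zero => simp [pvFirstRun]
  | succ m =>
    simp [pvFirstRun, List.replicate_succ, List.dropWhile_cons, List.takeWhile_cons,
      List.takeWhile_replicate]

theorem takeWhile_append_ne (ys : List Char) (c : Char) (hc : c ≠ '#') :
    ∀ xs : List Char, ((xs ++ c :: ys).takeWhile (· = '#')).length
      = (xs.takeWhile (· = '#')).length := by
  intro xs
  induction xs with
  | nil => simp [List.takeWhile_cons, hc]
  | cons x t ih =>
    by_cases hx : x = '#' <;> simp [List.takeWhile_cons, hx, ih]

theorem firstRun_append_mem (xs : List Char) (ys : List Char) (c : Char)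
    (hm : '#' ∈ xs) (hc : c ≠ '#') :
    pvFirstRun (xs ++ c :: ys) = pvFirstRun xs := by
  induction xs with
  | nil => simp at hm
  | cons x t ih =>
    by_cases hx : x = '#'
    · simp only [pvFirstRun, List.cons_append, List.dropWhile_cons, hx]
      simp [List.takeWhile_cons, takeWhile_append_ne ys c hc t]
    · have hm' : '#' ∈ t := by
        cases hm with
        | head => exact absurd rfl hx
        | tail _ h => exact h
      simpa [pvFirstRun, List.dropWhile_cons, hx] using ih hm'

theorem firstRun_append_nomem (xs : List Char) (ys : List Char) (c : Char)
    (hm : '#' ∉ xs) (hc : c ≠ '#') :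
    pvFirstRun (xs ++ c :: ys) = pvFirstRun ys := by
  induction xs with
  | nil => simp [pvFirstRun, List.dropWhile_cons, hc]
  | cons x t ih =>
    have hx : x ≠ '#' := by intro e; exact hm (by simp [e])
    have := ih (by intro m; exact hm (by simp [m]))
    simpa [pvFirstRun, List.dropWhile_cons, hx] using this

-- main invariant: the last collected run of (#^n ++ cs) equals the first run of its reverse
theorem altGo_last (cs : List Char) : ∀ n : Nat,
    ((isValidBkwAltGo cs (n : Int) []).getLast?.getD 0)
      = pvFirstRun (cs.reverse ++ List.replicate n '#') := by
  induction cs with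
  | nil =>
    intro n
    cases n with
    | zero => simp [isValidBkwAltGo, pvFirstRun]
    | succ m =>
      have hpos : ((m + 1 : Nat) : Int) > 0 := by push_cast; omega
      simp [isValidBkwAltGo, hpos, firstRun_replicate]
  | cons c rest ih =>
    intro n
    by_cases hc : c = '#'
    · have hcast : ((n : Int) + 1) = ((n + 1 : Nat) : Int) := by push_cast; ring
      have hlist : (c :: rest).reverse ++ List.replicate n '#'
          = rest.reverse ++ List.replicate (n + 1) '#' := by
        rw [List.reverse_cons, List.append_assoc, hc]
        simp [List.replicate_succ]
      simp only [isValidBkwAltGo, if_pos hc, hcast, ih (n + 1), hlist]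
    · cases n with
      | zero =>
        simp only [isValidBkwAltGo, if_neg hc, Nat.cast_zero,
          if_neg (by omega : ¬ (0:Int) > 0)]
        simp only [List.reverse_cons, List.append_assoc, List.singleton_append]
        have h0 := ih 0
        simp only [Nat.cast_zero] at h0
        rw [h0]
        by_cases hm : '#' ∈ rest
        · rw [firstRun_append_mem rest.reverse (List.replicate 0 '#') c (by simpa using hm) hc]
          simp
        · rw [firstRun_append_nomem rest.reverse (List.replicate 0 '#') c (by simpa using hm) hc]
          simp only [List.replicate_zero, List.append_nil]
          rw [firstRun_no_hash rest.reverse (by simpa using hm)]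
          simp [pvFirstRun]
      | succ m =>
        have hpos : ((m + 1 : Nat) : Int) > 0 := by push_cast; omega
        simp only [isValidBkwAltGo, if_neg hc, if_pos hpos, List.nil_append]
        simp only [List.reverse_cons, List.append_assoc, List.singleton_append]
        rw [altGo_acc rest 0 [((m + 1 : Nat) : Int)]]
        by_cases hm : '#' ∈ rest
        · have hne : isValidBkwAltGo rest 0 [] ≠ [] := by
            rw [Ne, altGo_nil_iff]; simpa using hm
          rw [List.getLast?_append_of_ne_nil _ hne]
          have := ih 0
          simp only [Nat.cast_zero, List.replicate_zero, List.append_nil] at this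
          rw [this]
          rw [firstRun_append_mem rest.reverse (List.replicate (m + 1) '#') c
            (by simpa using hm) hc]
        · have hnil : isValidBkwAltGo rest 0 [] = [] := by
            rw [altGo_nil_iff]; simpa using hm
          rw [hnil]
          rw [firstRun_append_nomem rest.reverse (List.replicate (m + 1) '#') c
            (by simpa using hm) hc]
          rw [firstRun_replicate]
          simp

-- ===== VERDICT (by name: the statement is the Claim_ definition above) =====
theorem isValidBkw_spec : Claim_equal_isValidBkw := by
  intro problem size _
  unfold Spec_isValidBkw isValidBkw isValidBkw_alt
  have h1 := go_zero problem.toList.reverse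
  have h2 := altGo_last problem.toList 0
  simp only [Nat.cast_zero] at h2
  rw [h1, h2]
  simp
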